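-- pv_equiv track=rewrite | github.com/GY-Xu/RelaxSH | src/relaxsh/library.py | _normalize_snake_points
-- ===== SOURCE A (Python) =====
-- GAME_SNAKE_ROWS = 12
--
-- GAME_SNAKE_COLS = 18
--
-- def _normalize_snake_points(points: object) -> list[list[int]]:
--     if not isinstance(points, list):
--         return []
--
--     normalized: list[list[int]] = []
--     seen: set[tuple[int, int]] = set()
--     for entry in points:
--         if not isinstance(entry, (list, tuple)) or len(entry) != 2:
--             return []
--         try:
--             row_index = int(entry[0])
--             col_index = int(entry[1])
--         except (TypeError, ValueError):
--             return []
--         if not (0 <= row_index < GAME_SNAKE_ROWS and 0 <= col_index < GAME_SNAKE_COLS):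
--             return []
--         key = (row_index, col_index)
--         if key in seen:
--             continue
--         seen.add(key)
--         normalized.append([row_index, col_index])
--     return normalized
-- ===== SOURCE B (Python) =====
-- GAME_SNAKE_ROWS = 12
--
-- GAME_SNAKE_COLS = 18
--
--
-- def _validated_cells(points):
--     """Recursively convert points to a list of in-bounds (row, col) tuples, or None if any entry is invalid."""
--     if not points:
--         return []
--     entry = points[0]
--     if not isinstance(entry, (list, tuple)) or len(entry) != 2:
--         return None
--     try:
--         row_index = int(entry[0])
--         col_index = int(entry[1])
--     except (TypeError, ValueError):
--         return None
--     if not (0 <= row_index < GAME_SNAKE_ROWS and 0 <= col_index < GAME_SNAKE_COLS):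
--         return None
--     rest = _validated_cells(points[1:])
--     if rest is None:
--         return None
--     return [(row_index, col_index)] + rest
--
--
-- def _normalize_snake_points(points: object) -> list[list[int]]:
--     if not isinstance(points, list):
--         return []
--     cells = _validated_cells(points)
--     if cells is None:
--         return []
--     # keep a cell exactly when it does not occur earlier in the list (no set/dict needed)
--     return [[r, c] for i, (r, c) in enumerate(cells) if (r, c) not in cells[:i]]
-- ===== Notes on version B (the rewrite author's own statement) =====
-- stated objective: alternative
-- what changed: A interleaves validation and dedup in one loop carrying a seen-set and an accumulator; B first validates the whole list by structural recursion into (row, col) tuples (all-or-nothing), then deduplicates with no auxiliary structure at all by keeping a cell exactly when it does not occur in the prefix cells[:i] (a quadratic prefix-membership scan instead of a hash set).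
import Mathlib
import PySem

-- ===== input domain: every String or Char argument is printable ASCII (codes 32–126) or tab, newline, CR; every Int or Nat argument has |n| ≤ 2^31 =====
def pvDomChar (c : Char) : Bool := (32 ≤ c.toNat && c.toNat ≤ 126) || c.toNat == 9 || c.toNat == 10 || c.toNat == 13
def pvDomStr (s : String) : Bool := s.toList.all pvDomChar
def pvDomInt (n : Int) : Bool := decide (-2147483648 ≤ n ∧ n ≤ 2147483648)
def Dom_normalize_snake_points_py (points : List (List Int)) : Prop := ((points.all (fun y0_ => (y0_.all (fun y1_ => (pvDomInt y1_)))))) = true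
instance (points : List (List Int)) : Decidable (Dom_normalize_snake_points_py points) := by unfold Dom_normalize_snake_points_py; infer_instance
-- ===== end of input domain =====

-- B replaces A's single-pass seen-set loop with recursive all-or-nothing validation followed by quadratic
-- prefix-membership deduplication (keep a cell iff it is absent from cells[:i]) — alternative decomposition, no set/dict.


-- ===== PORT A =====
-- A's loop: state = seen-set of (row, col) keys + accumulator of normalized rows;
-- an entry of the wrong shape or out of bounds aborts with []. (int() on an int is
-- the identity and cannot raise, so the try/except never fires on List Int input.)
def pvLoopA : List (List Int) → PySem.Set (Int × Int) → List (List Int) → List (List Int)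
  | [], _, normalized => normalized
  | entry :: rest, seen, normalized =>
    match entry with
    | [r, c] =>
      if 0 ≤ r ∧ r < 12 ∧ 0 ≤ c ∧ c < 18 then
        if PySem.Set.contains seen (r, c) then
          pvLoopA rest seen normalized
        else
          pvLoopA rest (PySem.Set.add seen (r, c)) (normalized ++ [[r, c]])
      else []
    | _ => []

def normalize_snake_points_py (points : List (List Int)) : List (List Int) :=
  pvLoopA points PySem.Set.empty []

-- ===== PORT B =====
-- _validated_cells: recursive conversion of the whole list to (row, col) tuples; none = some entry invalid.
def pvValidatedCells : List (List Int) → Option (List (Int × Int))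
  | [] => some []
  | entry :: rest =>
    match entry with
    | [r, c] =>
      if 0 ≤ r ∧ r < 12 ∧ 0 ≤ c ∧ c < 18 then
        match pvValidatedCells rest with
        | none => none
        | some cs => some ((r, c) :: cs)
      else none
    | _ => none

-- '[[r, c] for i, (r, c) in enumerate(cells) if (r, c) not in cells[:i]]'
def normalize_snake_points_py_alt (points : List (List Int)) : List (List Int) :=
  match pvValidatedCells points with
  | none => []
  | some cells =>
      (PySem.List.enumerate cells 0).filterMap
        (fun ip =>
          if ip.2 ∈ PySem.List.slice cells none (some ip.1) then none
          else some [ip.2.1, ip.2.2])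

-- ===== PRECONDITION & SPEC =====
def Spec_normalize_snake_points_py (points : List (List Int)) (out : List (List Int)) : Prop := out = normalize_snake_points_py_alt points
instance (points : List (List Int)) (out : List (List Int)) : Decidable (Spec_normalize_snake_points_py points out) := by unfold Spec_normalize_snake_points_py; infer_instance

-- ===== CLAIM (what is proved, stated in full; the proofs are below) =====
def Claim_equal_normalize_snake_points_py : Prop := ∀ (points : List (List Int)), Dom_normalize_snake_points_py points → Spec_normalize_snake_points_py points (normalize_snake_points_py points)

-- ===== LEMMAS AND PROOFS =====

-- common reference form: walk the cells with the explicit prefix of already-seen cells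
def pvFF : List (Int × Int) → List (Int × Int) → List (List Int)
  | _, [] => []
  | pre, p :: rest =>
    if p ∈ pre then pvFF (pre ++ [p]) rest
    else [p.1, p.2] :: pvFF (pre ++ [p]) rest

-- pvFF only looks at the prefix through membership
theorem pvFF_congr :
    ∀ (cells pre₁ pre₂ : List (Int × Int)), (∀ q, q ∈ pre₁ ↔ q ∈ pre₂) →
      pvFF pre₁ cells = pvFF pre₂ cells := by
  intro cells
  induction cells with
  | nil => intro _ _ _; rfl
  | cons p rest ih =>
    intro pre₁ pre₂ h
    have hmem : ∀ q, q ∈ pre₁ ++ [p] ↔ q ∈ pre₂ ++ [p] := by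
      intro q; simp [h q]
    by_cases hp : p ∈ pre₁
    · simp [pvFF, hp, (h p).mp hp, ih _ _ hmem]
    · have hp₂ : p ∉ pre₂ := fun hc => hp ((h p).mpr hc)
      simp [pvFF, hp, hp₂, ih _ _ hmem]

-- B's comprehension over enumerate equals the prefix walk
theorem pvEnum_eq_pvFF :
    ∀ (rest pre : List (Int × Int)),
      (PySem.List.enumerate rest (pre.length : Int)).filterMap
        (fun ip =>
          if ip.2 ∈ PySem.List.slice (pre ++ rest) none (some ip.1) then none
          else some [ip.2.1, ip.2.2])
      = pvFF pre rest := by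
  intro rest
  induction rest with
  | nil => intro pre; simp [PySem.List.enumerate, pvFF]
  | cons p rs ih =>
    intro pre
    have hsl : PySem.List.slice (pre ++ p :: rs) none (some (pre.length : Int))
        = pre := by
      rw [PySem.List.slice_to_natCast]
      exact List.take_left
    have hrw : pre ++ p :: rs = (pre ++ [p]) ++ rs := by simp
    have hidx : (pre.length : Int) + 1 = ((pre ++ [p]).length : Int) := by
      simp
    have ihx := ih (pre ++ [p])
    rw [PySem.List.enumerate_cons, List.filterMap_cons]
    by_cases hp : p ∈ pre
    · simp only [hsl, hp, ite_true, pvFF]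
      rw [hrw, hidx]
      exact ihx
    · simp only [hsl, hp, ite_false, pvFF]
      rw [hrw, hidx]
      rw [ihx]
-- if validation fails, A's loop returns [] no matter what its state is
theorem pvLoopA_bad :
    ∀ (pts : List (List Int)) (seen : PySem.Set (Int × Int)) (acc : List (List Int)),
      pvValidatedCells pts = none → pvLoopA pts seen acc = [] := by
  intro pts
  induction pts with
  | nil => intro _ _ h; simp [pvValidatedCells] at h
  | cons e rest ih =>
    intro seen acc h
    match e with
    | [r, c] =>
      by_cases hb : 0 ≤ r ∧ r < 12 ∧ 0 ≤ c ∧ c < 18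
      · have hrest : pvValidatedCells rest = none := by
          simp only [pvValidatedCells, if_pos hb] at h
          cases hv : pvValidatedCells rest with
          | none => rfl
          | some cs => rw [hv] at h; simp at h
        by_cases hs : (r, c) ∈ seen
        · simpa [pvLoopA, hb, hs] using ih seen acc hrest
        · simpa [pvLoopA, hb, hs] using ih (PySem.Set.add seen (r, c)) (acc ++ [[r, c]]) hrest
      · simp [pvLoopA, hb]
    | [] => simp [pvLoopA]
    | [_] => simp [pvLoopA]
    | _ :: _ :: _ :: _ => simp [pvLoopA]

-- if validation succeeds, A's loop appends exactly pvFF of the validated cells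
theorem pvLoopA_good :
    ∀ (pts : List (List Int)) (cells : List (Int × Int))
      (seen : PySem.Set (Int × Int)) (acc : List (List Int)),
      pvValidatedCells pts = some cells →
      pvLoopA pts seen acc = acc ++ pvFF seen cells := by
  intro pts
  induction pts with
  | nil =>
    intro cells seen acc h
    simp only [pvValidatedCells, Option.some.injEq] at h
    subst h; simp [pvLoopA, pvFF]
  | cons e rest ih =>
    intro cells seen acc h
    match e with
    | [r, c] =>
      by_cases hb : 0 ≤ r ∧ r < 12 ∧ 0 ≤ c ∧ c < 18
      · simp only [pvValidatedCells, if_pos hb] at h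
        cases hv : pvValidatedCells rest with
        | none => rw [hv] at h; simp at h
        | some cs =>
          rw [hv] at h; simp only [Option.some.injEq] at h
          subst h
          by_cases hs : (r, c) ∈ seen
          · have hcg : pvFF seen cs = pvFF (seen ++ [(r, c)]) cs := by
              apply pvFF_congr
              intro q; simp; intro hq; subst hq; exact hs
            simp [pvLoopA, hb, hs, pvFF, PySem.Set.contains, ← hcg, ih cs seen acc hv]
          · have := ih cs (PySem.Set.add seen (r, c)) (acc ++ [[r, c]]) hv
            simpa [pvLoopA, hb, hs, pvFF, PySem.Set.contains, PySem.Set.add] using this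
      · simp [pvValidatedCells, hb] at h
    | [] => simp [pvValidatedCells] at h
    | [_] => simp [pvValidatedCells] at h
    | _ :: _ :: _ :: _ => simp [pvValidatedCells] at h

-- ===== VERDICT (by name: the statement is the Claim_ definition above) =====
theorem normalize_snake_points_py_spec : Claim_equal_normalize_snake_points_py := by
  intro points _
  unfold Spec_normalize_snake_points_py
  unfold normalize_snake_points_py normalize_snake_points_py_alt
  cases hv : pvValidatedCells points with
  | none => exact pvLoopA_bad points PySem.Set.empty [] hv
  | some cells =>
    rw [pvLoopA_good points cells PySem.Set.empty [] hv, List.nil_append]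
    have h := pvEnum_eq_pvFF cells []
    simpa using h.symm
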